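-- pv_equiv track=rewrite | github.com/nikontra/zadachi | piece.py | get_distance_to_empty
-- ===== SOURCE A (Python) =====
-- def get_distance_to_empty(list_pieces, empty_pieces):
--     a = len(list_pieces)
--     distance_to_empty = [a]*a
--     for empty_piece in empty_pieces:
--         for piece in range(len(list_pieces)):
--             distance = abs(empty_piece - piece)
--             if distance_to_empty[piece] > distance:
--                 distance_to_empty[piece] = distance
--     return distance_to_empty
-- ===== SOURCE B (Python) =====
-- def get_distance_to_empty(list_pieces, empty_pieces):
--     n = len(list_pieces)
--     # bucket the empties: in-range positions as flags, plus the closest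
--     # out-of-range empty on each side
--     is_empty = [False] * n
--     left = None   # largest empty position < 0
--     right = None  # smallest empty position >= n
--     for e in empty_pieces:
--         if 0 <= e < n:
--             is_empty[e] = True
--         elif e < 0:
--             if left is None or e > left:
--                 left = e
--         else:
--             if right is None or e < right:
--                 right = e
--     dist = [n] * n
--     # forward sweep: nearest empty at or to the left
--     last = left
--     for i in range(n):
--         if is_empty[i]:
--             last = i
--         if last is not None and i - last < dist[i]:
--             dist[i] = i - last
--     # backward sweep: nearest empty at or to the right
--     nxt = right
--     for i in range(n - 1, -1, -1):
--         if is_empty[i]: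
--             nxt = i
--         if nxt is not None and nxt - i < dist[i]:
--             dist[i] = nxt - i
--     return dist
-- ===== Notes on version B (the rewrite author's own statement) =====
-- stated objective: faster
-- what changed: Replaces the per-empty full rescan of all indices by bucketing the empties once (in-range flag array plus nearest out-of-range empty on each side) followed by two linear sweeps computing the nearest empty to the left and to the right, O(n+m) instead of O(n*m).
import Mathlib
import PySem

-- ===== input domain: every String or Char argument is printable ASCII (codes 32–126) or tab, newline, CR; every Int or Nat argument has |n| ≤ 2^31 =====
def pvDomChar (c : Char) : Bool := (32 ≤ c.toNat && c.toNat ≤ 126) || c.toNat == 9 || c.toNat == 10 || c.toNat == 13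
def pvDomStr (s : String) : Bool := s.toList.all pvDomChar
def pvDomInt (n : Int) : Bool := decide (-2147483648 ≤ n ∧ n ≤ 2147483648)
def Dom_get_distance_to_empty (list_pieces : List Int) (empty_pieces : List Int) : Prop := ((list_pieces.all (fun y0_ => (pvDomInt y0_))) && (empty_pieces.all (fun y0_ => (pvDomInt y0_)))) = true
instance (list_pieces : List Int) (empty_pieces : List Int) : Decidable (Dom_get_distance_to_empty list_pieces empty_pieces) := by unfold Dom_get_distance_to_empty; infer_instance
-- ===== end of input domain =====

-- B buckets the empties once (in-range flags + nearest out-of-range empty per side) and then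
-- does two linear nearest-empty sweeps: O(n+m) instead of A's O(n*m) per-empty rescans.

-- ===== PORT A =====
-- A: d starts as [n]*n; for each empty e, for each index piece, lower d[piece] to |e - piece| if larger.
def get_distance_to_empty (list_pieces : List Int) (empty_pieces : List Int) : List Int :=
  let a : Int := (list_pieces.length : Int)
  let d0 : List Int := List.replicate list_pieces.length a
  empty_pieces.foldl (fun d e =>
    (List.range list_pieces.length).foldl (fun d (piece : ℕ) =>
      let distance : Int := |e - (piece : Int)|
      if d.getD piece 0 > distance then d.set piece distance else d) d) d0

-- ===== PORT B =====
-- B-side helpers: the three loop bodies of Source B, named so the folds stay readable.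
-- classification loop body: flag in-range empties, keep max negative empty and min empty ≥ n
def pvClsStep (n : ℕ) (st : List Bool × Option Int × Option Int) (e : Int) :
    List Bool × Option Int × Option Int :=
  if 0 ≤ e ∧ e < (n : Int) then (st.1.set e.toNat true, st.2.1, st.2.2)
  else if e < 0 then
    (st.1, (match st.2.1 with
            | none => some e
            | some l => if l < e then some e else some l), st.2.2)
  else
    (st.1, st.2.1, (match st.2.2 with
                    | none => some e
                    | some r => if e < r then some e else some r))

-- forward sweep body (index i : ℕ from range(n))
def pvFwdStep (isE : List Bool) (st : Option Int × List Int) (i : ℕ) : Option Int × List Int :=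
  let last := if isE.getD i false then some (i : Int) else st.1
  match last with
  | none => (none, st.2)
  | some l => if (i : Int) - l < st.2.getD i 0 then (some l, st.2.set i ((i : Int) - l))
              else (some l, st.2)

-- backward sweep body (index i : Int from range(n-1,-1,-1); 0 ≤ i there, so .toNat is exact)
def pvBwdStep (isE : List Bool) (st : Option Int × List Int) (i : Int) : Option Int × List Int :=
  let nxt := if isE.getD i.toNat false then some i else st.1
  match nxt with
  | none => (none, st.2)
  | some r => if r - i < st.2.getD i.toNat 0 then (some r, st.2.set i.toNat (r - i))
              else (some r, st.2)

def get_distance_to_empty_alt (list_pieces : List Int) (empty_pieces : List Int) : List Int :=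
  let n := list_pieces.length
  let cls := empty_pieces.foldl (pvClsStep n) (List.replicate n false, none, none)
  let fwd := (List.range n).foldl (pvFwdStep cls.1) (cls.2.1, List.replicate n (n : Int))
  let bwd := (PySem.List.pyRange ((n : Int) - 1) (-1) (-1)).foldl (pvBwdStep cls.1) (cls.2.2, fwd.2)
  bwd.2

-- ===== PRECONDITION & SPEC =====
def Spec_get_distance_to_empty (list_pieces : List Int) (empty_pieces : List Int) (out : List Int) : Prop := out = get_distance_to_empty_alt list_pieces empty_pieces
instance (list_pieces : List Int) (empty_pieces : List Int) (out : List Int) : Decidable (Spec_get_distance_to_empty list_pieces empty_pieces out) := by unfold Spec_get_distance_to_empty; infer_instance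

-- ===== CLAIM (what is proved, stated in full; the proofs are below) =====
def Claim_equal_get_distance_to_empty : Prop := ∀ (list_pieces : List Int) (empty_pieces : List Int), Dom_get_distance_to_empty list_pieces empty_pieces → Spec_get_distance_to_empty list_pieces empty_pieces (get_distance_to_empty list_pieces empty_pieces)

-- ===== LEMMAS AND PROOFS =====

-- ---------- A side: A's nested loops compute, pointwise, a min-fold over the empties ----------

-- One pass of A's inner loop, restricted to the first k indices, applied to a state given pointwise by g.
theorem pv_inner_k (n : ℕ) (e : Int) (g : ℕ → Int) (k : ℕ) (hk : k ≤ n) :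
    (List.range k).foldl (fun d (piece : ℕ) =>
      let distance : Int := |e - (piece : Int)|
      if d.getD piece 0 > distance then d.set piece distance else d)
      ((List.range n).map g)
    = (List.range n).map (fun (i : ℕ) => if i < k then min (g i) |e - (i : Int)| else g i) := by
  induction k with
  | zero => simp
  | succ k ih =>
      have hk' : k ≤ n := Nat.le_of_succ_le hk
      have hkn : k < n := hk
      rw [List.range_succ, List.foldl_append, ih hk']
      simp only [List.foldl_cons, List.foldl_nil]
      have hlen : ((List.range n).map (fun (i : ℕ) => if i < k then min (g i) |e - (i : Int)| else g i)).length = n := by simp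
      have hget : ((List.range n).map (fun (i : ℕ) => if i < k then min (g i) |e - (i : Int)| else g i)).getD k 0 = g k := by
        rw [List.getD_eq_getElem _ _ (by simpa [hlen] using hkn)]
        simp
      rw [hget]
      by_cases h : g k > |e - (k : Int)|
      · simp only [h, if_pos]
        apply List.ext_getElem
        · simp
        · intro i hi1 hi2
          simp only [List.length_set, hlen] at hi1
          rw [List.getElem_set]
          by_cases hik : i = k
          · subst hik
            simp [min_eq_right (le_of_lt h)]
          · simp only [Ne.symm hik, if_neg, not_false_iff]
            simp only [List.getElem_map, List.getElem_range]
            by_cases h2 : i < k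
            · simp [h2, Nat.lt_succ_of_lt h2]
            · have h3 : ¬ i < k + 1 := by omega
              simp [h2, h3]
      · simp only [h, if_neg, not_false_iff]
        apply List.ext_getElem
        · simp
        · intro i hi1 hi2
          simp only [List.getElem_map, List.getElem_range]
          by_cases hik : i = k
          · subst hik
            have : min (g i) |e - (i : Int)| = g i :=
              min_eq_left (by omega)
            simp [this]
          · by_cases h2 : i < k
            · simp [h2, Nat.lt_succ_of_lt h2]
            · have h3 : ¬ i < k + 1 := by omega
              simp [h2, h3]

-- One full inner pass turns the pointwise state g into i ↦ min (g i) |e - i|.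
theorem pv_inner (n : ℕ) (e : Int) (g : ℕ → Int) :
    (List.range n).foldl (fun d (piece : ℕ) =>
      let distance : Int := |e - (piece : Int)|
      if d.getD piece 0 > distance then d.set piece distance else d)
      ((List.range n).map g)
    = (List.range n).map (fun (i : ℕ) => min (g i) |e - (i : Int)|) := by
  rw [pv_inner_k n e g n (le_refl n)]
  apply List.map_congr_left
  intro i hi
  simp only [List.mem_range] at hi
  simp [hi]

-- A's outer loop over the empties keeps the state pointwise: it is the transposed min-fold.
theorem pv_outer (n : ℕ) (es : List Int) (g : ℕ → Int) :
    es.foldl (fun d e =>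
      (List.range n).foldl (fun d (piece : ℕ) =>
        let distance : Int := |e - (piece : Int)|
        if d.getD piece 0 > distance then d.set piece distance else d) d)
      ((List.range n).map g)
    = (List.range n).map (fun (i : ℕ) => es.foldl (fun m e => min m |e - (i : Int)|) (g i)) := by
  induction es generalizing g with
  | nil => simp
  | cons e rest ih =>
      simp only [List.foldl_cons]
      rw [pv_inner n e g, ih (fun i => min (g i) |e - (i : Int)|)]

-- ---------- B side: componentwise view of the classification fold ----------

def pvAStep (n : ℕ) (a : List Bool) (e : Int) : List Bool :=
  if 0 ≤ e ∧ e < (n : Int) then a.set e.toNat true else a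

def pvLStep (l : Option Int) (e : Int) : Option Int :=
  if e < 0 then (match l with
                 | none => some e
                 | some l' => if l' < e then some e else some l') else l

def pvRStep (n : ℕ) (r : Option Int) (e : Int) : Option Int :=
  if (n : Int) ≤ e then (match r with
                         | none => some e
                         | some r' => if e < r' then some e else some r') else r

theorem pv_cls_decomp (n : ℕ) (es : List Int) :
    ∀ (a : List Bool) (l r : Option Int),
    es.foldl (pvClsStep n) (a, l, r) = (es.foldl (pvAStep n) a, es.foldl pvLStep l, es.foldl (pvRStep n) r) := by
  induction es with
  | nil => intro a l r; simp
  | cons e es ih =>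
      intro a l r
      simp only [List.foldl_cons]
      have hstep : pvClsStep n (a, l, r) e = (pvAStep n a e, pvLStep l e, pvRStep n r e) := by
        unfold pvClsStep pvAStep pvLStep pvRStep
        by_cases h1 : 0 ≤ e ∧ e < (n : Int)
        · have h2 : ¬ e < 0 := by omega
          have h3 : ¬ (n : Int) ≤ e := by omega
          simp [h1, h2, h3]
        · by_cases h2 : e < 0
          · have h3 : ¬ (n : Int) ≤ e := by
              have : (0 : Int) ≤ (n : Int) := by positivity
              omega
            simp [h1, h2, h3]
          · have h3 : (n : Int) ≤ e := by omega
            simp [h1, h2, h3]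
      rw [hstep, ih]

theorem pv_isE_length (n : ℕ) (es : List Int) :
    ∀ a : List Bool, (es.foldl (pvAStep n) a).length = a.length := by
  induction es with
  | nil => intro a; simp
  | cons e es ih =>
      intro a
      simp only [List.foldl_cons]
      rw [ih]
      unfold pvAStep
      split_ifs <;> simp

theorem pv_isE_char (n : ℕ) (es : List Int) :
    ∀ (a : List Bool) (j : ℕ), a.length = n → j < n →
    ((es.foldl (pvAStep n) a).getD j false = (a.getD j false || decide ((j : Int) ∈ es))) := by
  induction es with
  | nil => intro a j _ _; simp
  | cons e es ih =>
      intro a j hlen hj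
      simp only [List.foldl_cons]
      have hlen' : (pvAStep n a e).length = n := by
        unfold pvAStep; split_ifs <;> simp [hlen]
      rw [ih _ j hlen' hj]
      have hstep : (pvAStep n a e).getD j false = (a.getD j false || decide ((j : Int) = e)) := by
        unfold pvAStep
        by_cases h1 : 0 ≤ e ∧ e < (n : Int)
        · rw [if_pos h1]
          by_cases hje : (j : Int) = e
          · have hj' : j = e.toNat := by omega
            subst hj'
            rw [List.getD_eq_getElem _ _ (by simp [hlen]; omega)]
            simp [hje]
          · have hne : j ≠ e.toNat := by omega
            rw [List.getD_eq_getElem _ _ (by simp [hlen]; omega),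
                List.getD_eq_getElem _ _ (by simp [hlen]; omega)]
            rw [List.getElem_set]
            simp [Ne.symm hne, hje]
        · rw [if_neg h1]
          have : ¬ (j : Int) = e := by omega
          simp [this]
      rw [hstep]
      by_cases hmem : (j : Int) = e <;> cases a.getD j false <;> simp [hmem]

-- characterization of the max-negative-empty accumulator
theorem pv_left_char (es : List Int) :
    ∀ (S : List Int) (l : Option Int),
    (match l with
     | none => ∀ e ∈ S, 0 ≤ e
     | some L => L ∈ S ∧ L < 0 ∧ ∀ e ∈ S, e < 0 → e ≤ L) →
    (match es.foldl pvLStep l with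
     | none => ∀ e ∈ S ++ es, 0 ≤ e
     | some L => L ∈ S ++ es ∧ L < 0 ∧ ∀ e ∈ S ++ es, e < 0 → e ≤ L) := by
  induction es with
  | nil => intro S l h; simpa using h
  | cons e es ih =>
      intro S l h
      simp only [List.foldl_cons]
      have hstep : (match pvLStep l e with
          | none => ∀ x ∈ S ++ [e], 0 ≤ x
          | some L => L ∈ S ++ [e] ∧ L < 0 ∧ ∀ x ∈ S ++ [e], x < 0 → x ≤ L) := by
        unfold pvLStep
        by_cases he : e < 0
        · rw [if_pos he]
          cases l with
          | none =>
              dsimp only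
              refine ⟨by simp, he, ?_⟩
              intro x hx hx0
              rcases List.mem_append.mp hx with hx | hx
              · exact absurd hx0 (by have := h x hx; omega)
              · simp at hx; omega
          | some L =>
              obtain ⟨hL1, hL2, hL3⟩ := h
              by_cases hc : L < e
              · dsimp only
                rw [if_pos hc]
                dsimp only
                refine ⟨by simp, he, ?_⟩
                intro x hx hx0
                rcases List.mem_append.mp hx with hx | hx
                · have := hL3 x hx hx0; omega
                · simp at hx; omega
              · dsimp only
                rw [if_neg hc]
                dsimp only
                refine ⟨by simp [hL1], hL2, ?_⟩
                intro x hx hx0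
                rcases List.mem_append.mp hx with hx | hx
                · exact hL3 x hx hx0
                · simp at hx; omega
        · rw [if_neg he]
          cases l with
          | none =>
              dsimp only
              intro x hx
              rcases List.mem_append.mp hx with hx | hx
              · exact h x hx
              · simp at hx; omega
          | some L =>
              dsimp only
              obtain ⟨hL1, hL2, hL3⟩ := h
              refine ⟨by simp [hL1], hL2, ?_⟩
              intro x hx hx0
              rcases List.mem_append.mp hx with hx | hx
              · exact hL3 x hx hx0
              · simp at hx; omega
      have := ih (S ++ [e]) (pvLStep l e) hstep
      simpa [List.append_assoc] using this

-- characterization of the min-empty-≥-n accumulator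
theorem pv_right_char (n : ℕ) (es : List Int) :
    ∀ (S : List Int) (r : Option Int),
    (match r with
     | none => ∀ e ∈ S, e < (n : Int)
     | some R => R ∈ S ∧ (n : Int) ≤ R ∧ ∀ e ∈ S, (n : Int) ≤ e → R ≤ e) →
    (match es.foldl (pvRStep n) r with
     | none => ∀ e ∈ S ++ es, e < (n : Int)
     | some R => R ∈ S ++ es ∧ (n : Int) ≤ R ∧ ∀ e ∈ S ++ es, (n : Int) ≤ e → R ≤ e) := by
  induction es with
  | nil => intro S r h; simpa using h
  | cons e es ih =>
      intro S r h
      simp only [List.foldl_cons]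
      have hstep : (match pvRStep n r e with
          | none => ∀ x ∈ S ++ [e], x < (n : Int)
          | some R => R ∈ S ++ [e] ∧ (n : Int) ≤ R ∧ ∀ x ∈ S ++ [e], (n : Int) ≤ x → R ≤ x) := by
        unfold pvRStep
        by_cases he : (n : Int) ≤ e
        · rw [if_pos he]
          cases r with
          | none =>
              dsimp only
              refine ⟨by simp, he, ?_⟩
              intro x hx hx0
              rcases List.mem_append.mp hx with hx | hx
              · exact absurd hx0 (by have := h x hx; omega)
              · simp at hx; omega
          | some R =>
              obtain ⟨hR1, hR2, hR3⟩ := h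
              by_cases hc : e < R
              · dsimp only
                rw [if_pos hc]
                dsimp only
                refine ⟨by simp, he, ?_⟩
                intro x hx hx0
                rcases List.mem_append.mp hx with hx | hx
                · have := hR3 x hx hx0; omega
                · simp at hx; omega
              · dsimp only
                rw [if_neg hc]
                dsimp only
                refine ⟨by simp [hR1], hR2, ?_⟩
                intro x hx hx0
                rcases List.mem_append.mp hx with hx | hx
                · exact hR3 x hx hx0
                · simp at hx; omega
        · rw [if_neg he]
          cases r with
          | none =>
              dsimp only
              intro x hx
              rcases List.mem_append.mp hx with hx | hx
              · exact h x hx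
              · simp at hx; omega
          | some R =>
              dsimp only
              obtain ⟨hR1, hR2, hR3⟩ := h
              refine ⟨by simp [hR1], hR2, ?_⟩
              intro x hx hx0
              rcases List.mem_append.mp hx with hx | hx
              · exact hR3 x hx hx0
              · simp at hx; omega
      have := ih (S ++ [e]) (pvRStep n r e) hstep
      simpa [List.append_assoc] using this

-- ---------- B side: pointwise description of the two sweeps ----------

-- value of the "last empty seen" register after k forward steps
def pvLU (isE : List Bool) (left : Option Int) : ℕ → Option Int
  | 0 => left
  | k+1 => if isE.getD k false then some (k : Int) else pvLU isE left k

-- entry j after the forward sweep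
def pvFD (n : ℕ) (isE : List Bool) (left : Option Int) (j : ℕ) : Int :=
  match pvLU isE left (j+1) with
  | none => (n : Int)
  | some L => if (j : Int) - L < (n : Int) then (j : Int) - L else (n : Int)

-- value of the "next empty seen" register after k backward steps
def pvNU (n : ℕ) (isE : List Bool) (right : Option Int) : ℕ → Option Int
  | 0 => right
  | k+1 => if isE.getD (n-1-k) false then some ((n : Int) - 1 - k) else pvNU n isE right k

-- entry j after the backward sweep (the final output)
def pvBD (n : ℕ) (isE : List Bool) (left right : Option Int) (j : ℕ) : Int :=
  match pvNU n isE right (n - j) with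
  | none => pvFD n isE left j
  | some R => if R - (j : Int) < pvFD n isE left j then R - (j : Int) else pvFD n isE left j

theorem pv_fwd_inv (n : ℕ) (isE : List Bool) (left : Option Int) (k : ℕ) (hk : k ≤ n) :
    (List.range k).foldl (pvFwdStep isE) (left, (List.range n).map (fun _ => (n : Int)))
    = (pvLU isE left k, (List.range n).map (fun j => if j < k then pvFD n isE left j else (n : Int))) := by
  induction k with
  | zero => simp [pvLU]
  | succ k ih =>
      have hk' : k ≤ n := Nat.le_of_succ_le hk
      have hkn : k < n := hk
      rw [List.range_succ, List.foldl_append, ih hk']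
      simp only [List.foldl_cons, List.foldl_nil]
      unfold pvFwdStep
      have hlast : (if isE.getD k false then some ((k : ℕ) : Int) else pvLU isE left k) = pvLU isE left (k+1) := by
        simp [pvLU]
      dsimp only
      rw [hlast]
      have hget : (((List.range n).map (fun j => if j < k then pvFD n isE left j else (n : Int))).getD k 0) = (n : Int) := by
        rw [List.getD_eq_getElem _ _ (by simp; omega)]
        simp
      cases hc : pvLU isE left (k+1) with
      | none =>
          dsimp only
          refine Prod.ext rfl ?_
          dsimp only
          apply List.map_congr_left
          intro j hj
          simp only [List.mem_range] at hj
          by_cases h1 : j < k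
          · simp [h1, Nat.lt_succ_of_lt h1]
          · by_cases h2 : j = k
            · subst h2
              simp [h1, pvFD, hc]
            · have h3 : ¬ j < k + 1 := by omega
              simp [h1, h3]
      | some L =>
          dsimp only
          rw [hget]
          by_cases hcond : ((k : ℕ) : Int) - L < (n : Int)
          · rw [if_pos hcond]
            refine Prod.ext rfl ?_
            dsimp only
            apply List.ext_getElem
            · simp
            · intro j hj1 hj2
              simp only [List.length_set, List.length_map, List.length_range] at hj1
              rw [List.getElem_set]
              by_cases hjk : j = k
              · subst hjk
                simp [pvFD, hc, hcond]
              · rw [if_neg (Ne.symm hjk)]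
                simp only [List.getElem_map, List.getElem_range]
                by_cases h1 : j < k
                · simp [h1, Nat.lt_succ_of_lt h1]
                · have h3 : ¬ j < k + 1 := by omega
                  simp [h1, h3]
          · rw [if_neg hcond]
            refine Prod.ext rfl ?_
            dsimp only
            apply List.map_congr_left
            intro j hj
            simp only [List.mem_range] at hj
            by_cases h1 : j < k
            · simp [h1, Nat.lt_succ_of_lt h1]
            · by_cases h2 : j = k
              · subst h2
                simp [h1, pvFD, hc, hcond]
              · have h3 : ¬ j < k + 1 := by omega
                simp [h1, h3]

theorem pv_bwd_inv (n : ℕ) (isE : List Bool) (left right : Option Int) (k : ℕ) (hk : k ≤ n) :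
    (List.range k).foldl (fun st (t : ℕ) => pvBwdStep isE st ((n : Int) - 1 - t))
      (right, (List.range n).map (fun j => pvFD n isE left j))
    = (pvNU n isE right k, (List.range n).map (fun j => if n - k ≤ j then pvBD n isE left right j else pvFD n isE left j)) := by
  induction k with
  | zero =>
      simp only [List.range_zero, List.foldl_nil, pvNU]
      refine Prod.ext rfl ?_
      dsimp only
      apply List.map_congr_left
      intro j hj
      simp only [List.mem_range] at hj
      rw [if_neg (by omega)]
  | succ k ih =>
      have hk' : k ≤ n := Nat.le_of_succ_le hk
      have hkn : k < n := hk
      rw [List.range_succ, List.foldl_append, ih hk']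
      simp only [List.foldl_cons, List.foldl_nil]
      unfold pvBwdStep
      have hton : ((n : Int) - 1 - (k : ℕ)).toNat = n - 1 - k := by omega
      have hcast : ((n - 1 - k : ℕ) : Int) = (n : Int) - 1 - (k : ℕ) := by push_cast; omega
      have hnxt : (if isE.getD ((n : Int) - 1 - (k : ℕ)).toNat false then some ((n : Int) - 1 - (k : ℕ)) else pvNU n isE right k) = pvNU n isE right (k+1) := by
        rw [hton]
        simp [pvNU, hcast]
      dsimp only
      rw [hnxt, hton]
      have hget : (((List.range n).map (fun j => if n - k ≤ j then pvBD n isE left right j else pvFD n isE left j)).getD (n-1-k) 0) = pvFD n isE left (n-1-k) := by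
        rw [List.getD_eq_getElem _ _ (by simp; omega)]
        simp only [List.getElem_map, List.getElem_range]
        rw [if_neg (by omega)]
      have hnk : n - (n - 1 - k) = k + 1 := by omega
      cases hc : pvNU n isE right (k+1) with
      | none =>
          dsimp only
          refine Prod.ext rfl ?_
          dsimp only
          apply List.map_congr_left
          intro j hj
          simp only [List.mem_range] at hj
          by_cases h1 : n - k ≤ j
          · rw [if_pos h1, if_pos (by omega)]
          · by_cases h2 : j = n - 1 - k
            · subst h2
              rw [if_neg h1, if_pos (by omega)]
              unfold pvBD
              rw [hnk, hc]
            · rw [if_neg h1, if_neg (by omega)]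
      | some R =>
          dsimp only
          rw [hget]
          by_cases hcond : R - ((n : Int) - 1 - (k : ℕ)) < pvFD n isE left (n-1-k)
          · rw [if_pos hcond]
            refine Prod.ext rfl ?_
            dsimp only
            apply List.ext_getElem
            · simp
            · intro j hj1 hj2
              simp only [List.length_set, List.length_map, List.length_range] at hj1
              rw [List.getElem_set]
              by_cases hjk : j = n - 1 - k
              · subst hjk
                rw [if_pos rfl]
                simp only [List.getElem_map, List.getElem_range]
                rw [if_pos (by omega)]
                unfold pvBD
                rw [hnk, hc]
                dsimp only
                rw [hcast, if_pos hcond]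
              · rw [if_neg (Ne.symm hjk)]
                simp only [List.getElem_map, List.getElem_range]
                by_cases h1 : n - k ≤ j
                · rw [if_pos h1, if_pos (by omega)]
                · rw [if_neg h1, if_neg (by omega)]
          · rw [if_neg hcond]
            refine Prod.ext rfl ?_
            dsimp only
            apply List.map_congr_left
            intro j hj
            simp only [List.mem_range] at hj
            by_cases h1 : n - k ≤ j
            · rw [if_pos h1, if_pos (by omega)]
            · by_cases h2 : j = n - 1 - k
              · subst h2
                rw [if_neg h1, if_pos (by omega)]
                unfold pvBD
                rw [hnk, hc]
                dsimp only
                rw [hcast, if_neg hcond]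
              · rw [if_neg h1, if_neg (by omega)]

-- ---------- threshold characterizations of the sweep registers ----------

theorem pv_lu_char (es : List Int) (n : ℕ) (isE : List Bool) (left : Option Int)
    (hlen : isE.length = n)
    (hisE : ∀ j : ℕ, j < n → (isE.getD j false = true ↔ (j : Int) ∈ es))
    (hleft : match left with
             | none => ∀ e ∈ es, 0 ≤ e
             | some L => L ∈ es ∧ L < 0 ∧ ∀ e ∈ es, e < 0 → e ≤ L) :
    ∀ k : ℕ, k ≤ n →
    (match pvLU isE left k with
     | none => ∀ e ∈ es, (k : Int) - 1 < e
     | some L => L ∈ es ∧ L ≤ (k : Int) - 1 ∧ ∀ e ∈ es, e ≤ (k : Int) - 1 → e ≤ L) := by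
  intro k
  induction k with
  | zero =>
      intro _
      unfold pvLU
      cases left with
      | none => dsimp only; intro e he; have := hleft e he; omega
      | some L =>
          dsimp only
          obtain ⟨h1, h2, h3⟩ := hleft
          exact ⟨h1, by omega, fun e he he0 => h3 e he (by omega)⟩
  | succ k ih =>
      intro hk
      have hkn : k < n := hk
      have ihk := ih (Nat.le_of_lt hkn)
      unfold pvLU
      by_cases hE : isE.getD k false = true
      · have hkmem : (k : Int) ∈ es := (hisE k hkn).mp hE
        rw [if_pos hE]
        dsimp only
        refine ⟨hkmem, by push_cast; omega, fun e _ he => by push_cast at he ⊢; omega⟩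
      · have hknot : ¬ (k : Int) ∈ es := fun hmem => hE ((hisE k hkn).mpr hmem)
        rw [if_neg hE]
        cases hlu : pvLU isE left k with
        | none =>
            rw [hlu] at ihk
            dsimp only at ihk ⊢
            intro e he
            have h1 := ihk e he
            have h2 : e ≠ (k : Int) := fun h => hknot (h ▸ he)
            push_cast; omega
        | some L =>
            rw [hlu] at ihk
            dsimp only at ihk ⊢
            obtain ⟨h1, h2, h3⟩ := ihk
            refine ⟨h1, by push_cast; push_cast at h2; omega, fun e he he' => ?_⟩
            have h4 : e ≠ (k : Int) := fun h => hknot (h ▸ he)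
            exact h3 e he (by push_cast at he' ⊢; omega)

theorem pv_nu_char (es : List Int) (n : ℕ) (isE : List Bool) (right : Option Int)
    (hlen : isE.length = n)
    (hisE : ∀ j : ℕ, j < n → (isE.getD j false = true ↔ (j : Int) ∈ es))
    (hright : match right with
              | none => ∀ e ∈ es, e < (n : Int)
              | some R => R ∈ es ∧ (n : Int) ≤ R ∧ ∀ e ∈ es, (n : Int) ≤ e → R ≤ e) :
    ∀ k : ℕ, k ≤ n →
    (match pvNU n isE right k with
     | none => ∀ e ∈ es, e < (n : Int) - k
     | some R => R ∈ es ∧ (n : Int) - k ≤ R ∧ ∀ e ∈ es, (n : Int) - k ≤ e → R ≤ e) := by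
  intro k
  induction k with
  | zero =>
      intro _
      unfold pvNU
      cases right with
      | none => dsimp only; intro e he; have := hright e he; push_cast; omega
      | some R =>
          dsimp only
          obtain ⟨h1, h2, h3⟩ := hright
          exact ⟨h1, by push_cast; omega, fun e he he0 => h3 e he (by push_cast at he0; omega)⟩
  | succ k ih =>
      intro hk
      have hkn : k < n := hk
      have ihk := ih (Nat.le_of_lt hkn)
      unfold pvNU
      have hidx : ((n - 1 - k : ℕ) : Int) = (n : Int) - 1 - k := by push_cast; omega
      by_cases hE : isE.getD (n-1-k) false = true
      · have hkmem : ((n - 1 - k : ℕ) : Int) ∈ es := (hisE (n-1-k) (by omega)).mp hE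
        rw [hidx] at hkmem
        rw [if_pos hE]
        dsimp only
        refine ⟨hkmem, by push_cast; omega, fun e _ he => by push_cast at he ⊢; omega⟩
      · have hknot : ¬ ((n : Int) - 1 - k) ∈ es := fun hmem => hE ((hisE (n-1-k) (by omega)).mpr (by rw [hidx]; exact hmem))
        rw [if_neg hE]
        cases hnu : pvNU n isE right k with
        | none =>
            rw [hnu] at ihk
            dsimp only at ihk ⊢
            intro e he
            have h1 := ihk e he
            have h2 : e ≠ (n : Int) - 1 - k := fun h => hknot (h ▸ he)
            push_cast; omega
        | some R =>
            rw [hnu] at ihk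
            dsimp only at ihk ⊢
            obtain ⟨h1, h2, h3⟩ := ihk
            refine ⟨h1, by push_cast at h2 ⊢; omega, fun e he he' => ?_⟩
            have h4 : e ≠ (n : Int) - 1 - k := fun h => hknot (h ▸ he)
            exact h3 e he (by push_cast at he' ⊢; omega)

-- ---------- the min-fold spec (A's pointwise value) and the pointwise equality ----------

theorem pv_minfold_spec (es : List Int) (i : Int) :
    ∀ m : Int,
    (es.foldl (fun m e => min m |e - i|) m ≤ m) ∧
    (∀ e ∈ es, es.foldl (fun m e => min m |e - i|) m ≤ |e - i|) ∧
    (es.foldl (fun m e => min m |e - i|) m = m ∨ ∃ e ∈ es, es.foldl (fun m e => min m |e - i|) m = |e - i|) := by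
  induction es with
  | nil => intro m; exact ⟨le_refl m, by simp, Or.inl rfl⟩
  | cons e es ih =>
      intro m
      obtain ⟨h1, h2, h3⟩ := ih (min m |e - i|)
      simp only [List.foldl_cons]
      refine ⟨le_trans h1 (min_le_left _ _), ?_, ?_⟩
      · intro x hx
        rcases List.mem_cons.mp hx with hx | hx
        · subst hx; exact le_trans h1 (min_le_right _ _)
        · exact h2 x hx
      · rcases h3 with h3 | ⟨x, hx, h3⟩
        · rcases le_total m |e - i| with hm | hm
          · exact Or.inl (by rw [h3]; exact min_eq_left hm)
          · exact Or.inr ⟨e, List.mem_cons_self .., by rw [h3]; exact min_eq_right hm⟩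
        · exact Or.inr ⟨x, List.mem_cons_of_mem _ hx, h3⟩

theorem pv_point (es : List Int) (n : ℕ) (isE : List Bool) (left right : Option Int)
    (j : ℕ) (hj : j < n)
    (hlu : match pvLU isE left (j+1) with
           | none => ∀ e ∈ es, ((j+1 : ℕ) : Int) - 1 < e
           | some L => L ∈ es ∧ L ≤ ((j+1 : ℕ) : Int) - 1 ∧ ∀ e ∈ es, e ≤ ((j+1 : ℕ) : Int) - 1 → e ≤ L)
    (hnu : match pvNU n isE right (n - j) with
           | none => ∀ e ∈ es, e < (n : Int) - (n - j : ℕ)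
           | some R => R ∈ es ∧ (n : Int) - (n - j : ℕ) ≤ R ∧ ∀ e ∈ es, (n : Int) - (n - j : ℕ) ≤ e → R ≤ e) :
    es.foldl (fun m e => min m |e - (j : Int)|) (n : Int) = pvBD n isE left right j := by
  have ht1 : ((j+1 : ℕ) : Int) - 1 = (j : Int) := by push_cast; ring
  have ht2 : (n : Int) - ((n - j : ℕ) : Int) = (j : Int) := by push_cast; omega
  rw [ht1] at hlu
  rw [ht2] at hnu
  obtain ⟨hA1, hA2, hA3⟩ := pv_minfold_spec es (j : Int) (n : Int)
  unfold pvBD pvFD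
  cases hnu0 : pvNU n isE right (n - j) with
  | none =>
      rw [hnu0] at hnu
      dsimp only at hnu ⊢
      cases hlu0 : pvLU isE left (j+1) with
      | none =>
          rw [hlu0] at hlu
          dsimp only at hlu ⊢
          rcases hA3 with h | ⟨e, he, h⟩
          · exact h
          · have h1 := hnu e he
            have h2 := hlu e he
            omega
      | some L =>
          rw [hlu0] at hlu
          dsimp only at hlu ⊢
          obtain ⟨hL1, hL2, hL3⟩ := hlu
          have habsL : |L - (j : Int)| = (j : Int) - L := by
            rw [abs_of_nonpos (by omega)]; ring
          have hAL := hA2 L hL1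
          rw [habsL] at hAL
          apply le_antisymm
          · split_ifs <;> omega
          · rcases hA3 with h | ⟨e, he, h⟩
            · split_ifs <;> omega
            · have h1 := hnu e he
              have h2 := hL3 e he (by omega)
              have habse : |e - (j : Int)| = (j : Int) - e := by
                rw [abs_of_nonpos (by omega)]; ring
              rw [habse] at h
              split_ifs <;> omega
  | some R =>
      rw [hnu0] at hnu
      dsimp only at hnu ⊢
      obtain ⟨hR1, hR2, hR3⟩ := hnu
      have habsR : |R - (j : Int)| = R - (j : Int) := abs_of_nonneg (by omega)
      have hAR := hA2 R hR1
      rw [habsR] at hAR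
      cases hlu0 : pvLU isE left (j+1) with
      | none =>
          rw [hlu0] at hlu
          dsimp only at hlu ⊢
          apply le_antisymm
          · split_ifs <;> omega
          · rcases hA3 with h | ⟨e, he, h⟩
            · split_ifs <;> omega
            · have h1 := hlu e he
              have h2 := hR3 e he (by omega)
              have habse : |e - (j : Int)| = e - (j : Int) := abs_of_nonneg (by omega)
              rw [habse] at h
              split_ifs <;> omega
      | some L =>
          rw [hlu0] at hlu
          dsimp only at hlu ⊢
          obtain ⟨hL1, hL2, hL3⟩ := hlu
          have habsL : |L - (j : Int)| = (j : Int) - L := by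
            rw [abs_of_nonpos (by omega)]; ring
          have hAL := hA2 L hL1
          rw [habsL] at hAL
          apply le_antisymm
          · split_ifs <;> omega
          · rcases hA3 with h | ⟨e, he, h⟩
            · split_ifs <;> omega
            · rcases le_or_gt e (j : Int) with hej | hej
              · have h2 := hL3 e he hej
                have habse : |e - (j : Int)| = (j : Int) - e := by
                  rw [abs_of_nonpos (by omega)]; ring
                rw [habse] at h
                split_ifs <;> omega
              · have h2 := hR3 e he (by omega)
                have habse : |e - (j : Int)| = e - (j : Int) := abs_of_nonneg (by omega)
                rw [habse] at h
                split_ifs <;> omega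

-- ===== VERDICT (by name: the statement is the Claim_ definition above) =====
theorem get_distance_to_empty_spec : Claim_equal_get_distance_to_empty := by
  intro lp es _
  unfold Spec_get_distance_to_empty get_distance_to_empty get_distance_to_empty_alt
  have hrepl : List.replicate lp.length ((lp.length : Int)) = (List.range lp.length).map (fun _ => (lp.length : Int)) := by
    simp [List.map_const']
  simp only [hrepl]
  rw [pv_outer lp.length es (fun _ => (lp.length : Int))]
  rw [pv_cls_decomp]
  set n := lp.length with hn
  set isE := es.foldl (pvAStep n) (List.replicate n false) with hisEdef
  set left := es.foldl pvLStep none with hleftdef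
  set right := es.foldl (pvRStep n) none with hrightdef
  dsimp only
  rw [pv_fwd_inv n isE left n (le_refl n)]
  dsimp only
  have hfd : (List.range n).map (fun j => if j < n then pvFD n isE left j else (n : Int)) = (List.range n).map (fun j => pvFD n isE left j) := by
    apply List.map_congr_left
    intro j hj
    simp only [List.mem_range] at hj
    simp [hj]
  rw [hfd]
  have htn : (((n : Int) - 1) - (-1)).toNat = n := by omega
  rw [PySem.List.pyRange_neg_one, htn, List.foldl_map]
  rw [pv_bwd_inv n isE left right n (le_refl n)]
  dsimp only
  apply List.map_congr_left
  intro j hj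
  simp only [List.mem_range] at hj
  rw [if_pos (by omega)]
  have hlen : isE.length = n := by
    rw [hisEdef, pv_isE_length]
    simp
  have hisEc : ∀ i : ℕ, i < n → (isE.getD i false = true ↔ (i : Int) ∈ es) := by
    intro i hi
    rw [hisEdef, pv_isE_char n es _ i (by simp) hi]
    simp
  have hleftc := pv_left_char es [] none (by simp)
  have hrightc := pv_right_char n es [] none (by simp)
  simp only [List.nil_append] at hleftc hrightc
  exact pv_point es n isE left right j hj
    (pv_lu_char es n isE left hlen hisEc hleftc (j+1) (by omega))
    (pv_nu_char es n isE right hlen hisEc hrightc (n-j) (by omega))
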